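-- pv_equiv track=rewrite | github.com/donnafarris/aso_eda | src/model_data_wrangling.py | piece_number_to_letter
-- ===== SOURCE A (Python) =====
-- def piece_number_to_letter(piece_number):
--     """
--     Convert piece number to corresponding letter(s) in base 24 system (omitting I and O).
--
--     Args:
--         piece_number (int): The piece number to convert.
--
--     Returns:
--         str: The corresponding letter(s).
--     """
--     letters = "ABCDEFGHJKLMNPQRSTUVWXYZ"
--     result = ""
--     while piece_number > 0:
--         piece_number -= 1
--         result = letters[piece_number % 24] + result
--         piece_number //= 24
--     return result
-- ===== SOURCE B (Python) =====
-- def piece_number_to_letter(piece_number):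
--     """Two-stage: find the code length by subtracting block sizes 24, 24**2, ...,
--     then emit the remainder as a fixed-width plain base-24 numeral."""
--     letters = "ABCDEFGHJKLMNPQRSTUVWXYZ"
--     if piece_number <= 0:
--         return ""
--     n = piece_number - 1
--     length = 1
--     block = 24
--     while n >= block:
--         n -= block
--         length += 1
--         block *= 24
--     digits = []
--     for _ in range(length):
--         digits.append(letters[n % 24])
--         n //= 24
--     return "".join(reversed(digits))
-- ===== Notes on version B (the rewrite author's own statement) =====
-- stated objective: alternative
-- what changed: B first determines the output length by subtracting the block sizes 24, 24^2, ... from piece_number-1, then writes the remainder as a fixed-width plain base-24 numeral collected into a digit list and joined in reverse, instead of A's single bijective-base loop that decrements and prepends one letter per iteration.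
import Mathlib
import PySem

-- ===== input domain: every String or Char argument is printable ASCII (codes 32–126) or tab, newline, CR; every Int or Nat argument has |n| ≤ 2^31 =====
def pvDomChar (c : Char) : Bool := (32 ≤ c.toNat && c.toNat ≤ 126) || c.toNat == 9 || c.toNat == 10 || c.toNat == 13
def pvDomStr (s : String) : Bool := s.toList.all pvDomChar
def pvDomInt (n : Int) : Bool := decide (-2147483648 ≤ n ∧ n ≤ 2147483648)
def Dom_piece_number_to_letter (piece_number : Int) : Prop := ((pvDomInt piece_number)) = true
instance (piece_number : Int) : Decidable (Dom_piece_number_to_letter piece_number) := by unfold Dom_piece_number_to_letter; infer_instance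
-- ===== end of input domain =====

-- B replaces A's bijective-base-24 decrement-and-prepend loop by a two-stage algorithm:
-- find the code length by subtracting block sizes 24, 24^2, ..., then print the remainder
-- as a fixed-width plain base-24 numeral (objective: alternative; same O(log n) cost).

-- ===== PORT A =====
-- letters[k] for an in-range Python index k (A evaluates letters[m % 24], 0 ≤ m % 24 < 24,
-- so pyGet? is always `some` and the getD "" default is never taken).
def pvLetterA (k : Int) : String :=
  ((PySem.Str.pyGet? "ABCDEFGHJKLMNPQRSTUVWXYZ" k).map Char.toString).getD ""

-- the while-loop of A: state (piece_number, result)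
def pvLoopA (piece_number : Int) (result : String) : String :=
  if h : piece_number > 0 then
    have : (PySem.Int.floordiv (piece_number - 1) 24).toNat < piece_number.toNat := by
      rw [PySem.Int.floordiv_eq_ediv_of_pos (by omega)]
      have h1 : (piece_number - 1) / 24 ≤ piece_number - 1 :=
        Int.ediv_le_self _ (by omega)
      have h2 : (0:Int) ≤ (piece_number - 1) / 24 := Int.ediv_nonneg (by omega) (by omega)
      omega
    pvLoopA (PySem.Int.floordiv (piece_number - 1) 24)
      (pvLetterA (PySem.Int.mod (piece_number - 1) 24) ++ result)
  else result
termination_by piece_number.toNat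

def piece_number_to_letter (piece_number : Int) : String :=
  pvLoopA piece_number ""

-- ===== PORT B =====
-- B's first while-loop: state (n, length, block); the proof argument 0 < block carries the
-- loop invariant needed for termination (block starts at 24 and is only multiplied by 24).
def pvLenLoopB (n length block : Int) (hb : 0 < block) : Int × Int :=
  if h : n ≥ block then
    pvLenLoopB (n - block) (length + 1) (block * 24) (by positivity)
  else (n, length)
termination_by n.toNat
decreasing_by omega

-- B's for-loop over range(length): appends letters[n % 24] to the digit list, n //= 24
def pvDigitsB (k : Nat) (n : Int) (digits : List String) : List String :=
  match k with
  | 0 => digits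
  | Nat.succ k =>
      pvDigitsB k (PySem.Int.floordiv n 24)
        (digits ++ [pvLetterA (PySem.Int.mod n 24)])

def piece_number_to_letter_alt (piece_number : Int) : String :=
  if piece_number ≤ 0 then ""
  else
    let r := pvLenLoopB (piece_number - 1) 1 24 (by norm_num)
    String.join (pvDigitsB r.2.toNat r.1 []).reverse

-- ===== PRECONDITION & SPEC =====
def Spec_piece_number_to_letter (piece_number : Int) (out : String) : Prop := out = piece_number_to_letter_alt piece_number
instance (piece_number : Int) (out : String) : Decidable (Spec_piece_number_to_letter piece_number out) := by unfold Spec_piece_number_to_letter; infer_instance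

-- ===== CLAIM (what is proved, stated in full; the proofs are below) =====
def Claim_equal_piece_number_to_letter : Prop := ∀ (piece_number : Int), Dom_piece_number_to_letter piece_number → Spec_piece_number_to_letter piece_number (piece_number_to_letter piece_number)

-- ===== LEMMAS AND PROOFS =====

-- canonical recursive characterisation of the bijective base-24 code (proof helper)
def pvRec (n : Int) : String :=
  if h : 0 < n then
    have : ((n - 1) / 24).toNat < n.toNat := by
      have h1 : (n - 1) / 24 ≤ n - 1 := Int.ediv_le_self _ (by omega)
      have h2 : (0:Int) ≤ (n - 1) / 24 := Int.ediv_nonneg (by omega) (by omega)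
      omega
    pvRec ((n - 1) / 24) ++ pvLetterA ((n - 1) % 24)
  else ""
termination_by n.toNat

-- fixed-width plain base-24 numeral with L digits (proof helper)
def pvW (L : Nat) (n : Int) : String :=
  match L with
  | 0 => ""
  | Nat.succ L => pvW L (n / 24) ++ pvLetterA (n % 24)

-- first piece number whose code has L letters: pvC 1 = 1, pvC 2 = 25, pvC 3 = 601, ...
def pvC (L : Nat) : Int :=
  match L with
  | 0 => 0
  | Nat.succ L => 24 * pvC L + 1

theorem pvC_succ (L : Nat) : pvC (L + 1) = pvC L + 24 ^ L := by
  induction L with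
  | zero => simp [pvC]
  | succ L ih =>
      show 24 * pvC (L + 1) + 1 = (24 * pvC L + 1) + 24 ^ (L + 1)
      rw [ih]; ring

theorem pvC_nonneg (L : Nat) : 0 ≤ pvC L := by
  induction L with
  | zero => simp [pvC]
  | succ L ih => show 0 ≤ 24 * pvC L + 1; omega

-- A's accumulator loop computes pvRec ++ acc
theorem pvLoopA_eq_rec (n : Int) (acc : String) :
    pvLoopA n acc = pvRec n ++ acc := by
  by_cases h : n > 0
  · have : ((n - 1) / 24).toNat < n.toNat := by
      have h1 : (n - 1) / 24 ≤ n - 1 := Int.ediv_le_self _ (by omega)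
      have h2 : (0:Int) ≤ (n - 1) / 24 := Int.ediv_nonneg (by omega) (by omega)
      omega
    rw [pvLoopA, pvRec]
    simp only [h, dif_pos,
      PySem.Int.floordiv_eq_ediv_of_pos (by norm_num : (0:Int) < 24),
      PySem.Int.mod_eq_emod_of_pos (by norm_num : (0:Int) < 24)]
    rw [pvLoopA_eq_rec ((n - 1) / 24) _]
    rw [String.append_assoc]
  · rw [pvLoopA, pvRec]
    simp only [h, dif_neg, not_false_iff]
    exact String.empty_append.symm
termination_by n.toNat

-- String.join ∘ foldr bookkeeping: the initial string comes out on the left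
theorem pvJoin_foldr (ds : List String) (s : String) :
    List.foldr (fun x y => y ++ x) s ds
      = s ++ List.foldr (fun x y => y ++ x) "" ds := by
  induction ds with
  | nil => simp
  | cons d ds ih => simp [List.foldr, ih, String.append_assoc]

-- B's digit loop writes the fixed-width numeral (digits reversed then joined)
theorem pvDigitsB_eq_W (k : Nat) :
    ∀ (n : Int) (digits : List String),
    String.join (pvDigitsB k n digits).reverse
      = pvW k n ++ String.join digits.reverse := by
  induction k with
  | zero => intro n digits; simp [pvDigitsB, pvW]
  | succ k ih =>
      intro n digits
      rw [pvDigitsB, ih]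
      simp only [pvW,
        PySem.Int.floordiv_eq_ediv_of_pos (by norm_num : (0:Int) < 24),
        PySem.Int.mod_eq_emod_of_pos (by norm_num : (0:Int) < 24)]
      simp [String.join, String.append_assoc]
      exact pvJoin_foldr digits _

-- the fixed-width numeral for offset n is the bijective code of n + pvC L
theorem pvW_eq_rec (L : Nat) :
    ∀ n : Int, 0 ≤ n → n < 24 ^ L → pvW L n = pvRec (n + pvC L) := by
  induction L with
  | zero =>
      intro n h0 h1
      have h1' : n < (1:Int) := by simpa using h1
      have hn : n = 0 := by omega
      subst hn
      rw [pvW, pvRec]; simp [pvC]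
  | succ L ih =>
      intro n h0 h1
      have hc : 0 ≤ pvC L := pvC_nonneg L
      have hpos : 0 < n + pvC (L + 1) := by
        show 0 < n + (24 * pvC L + 1); omega
      rw [pvRec]
      simp only [hpos, dif_pos]
      have harg : n + pvC (L + 1) - 1 = n + 24 * pvC L := by
        show n + (24 * pvC L + 1) - 1 = n + 24 * pvC L; ring
      have hmod : (n + pvC (L + 1) - 1) % 24 = n % 24 := by
        rw [harg, Int.add_mul_emod_self_left]
      have hdiv : (n + pvC (L + 1) - 1) / 24 = n / 24 + pvC L := by
        rw [harg, Int.add_mul_ediv_left n (pvC L) (by norm_num : (24:Int) ≠ 0)]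
      rw [hmod, hdiv, pvW]
      have hq0 : 0 ≤ n / 24 := Int.ediv_nonneg h0 (by norm_num)
      have hq1 : n / 24 < 24 ^ L := by
        rw [Int.ediv_lt_iff_lt_mul (by norm_num)]
        calc n < 24 ^ (L + 1) := h1
        _ = 24 ^ L * 24 := by ring
      rw [ih (n / 24) hq0 hq1]

-- B's length loop: invariant — n stays nonnegative, n + pvC length is conserved,
-- and on exit n < block = 24 ^ length
theorem pvLenLoopB_spec (n len block : Int) (hb : 0 < block) (L : Nat)
    (h0 : 0 ≤ n) (hlen : len = (L : Int) + 1) (hblock : block = 24 ^ (L + 1)) :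
    0 ≤ (pvLenLoopB n len block hb).1 ∧ 0 ≤ (pvLenLoopB n len block hb).2 ∧
    (pvLenLoopB n len block hb).1 < 24 ^ (pvLenLoopB n len block hb).2.toNat ∧
    (pvLenLoopB n len block hb).1 + pvC (pvLenLoopB n len block hb).2.toNat
      = n + pvC (L + 1) := by
  rw [pvLenLoopB]
  by_cases h : n ≥ block
  · simp only [h, dif_pos]
    have step := pvLenLoopB_spec (n - block) (len + 1) (block * 24) (by positivity)
      (L + 1) (by omega) (by rw [hlen]; push_cast; ring) (by rw [hblock]; ring)
    refine ⟨step.1, step.2.1, step.2.2.1, ?_⟩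
    rw [step.2.2.2, pvC_succ (L + 1), hblock]
    ring
  · simp only [h, dif_neg, not_false_iff]
    have htn : ((L : Int) + 1).toNat = L + 1 := by omega
    refine ⟨h0, by omega, ?_, ?_⟩
    · rw [hlen, htn]
      rw [hblock] at h
      exact not_le.mp h
    · rw [hlen, htn]
termination_by n.toNat
decreasing_by omega

-- ===== VERDICT (by name: the statement is the Claim_ definition above) =====
theorem piece_number_to_letter_spec : Claim_equal_piece_number_to_letter := by
  intro p _
  show piece_number_to_letter p = piece_number_to_letter_alt p
  rw [piece_number_to_letter, pvLoopA_eq_rec, String.append_empty,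
    piece_number_to_letter_alt]
  by_cases h : p ≤ 0
  · simp only [h, if_pos]
    rw [pvRec]; simp [show ¬ (0:Int) < p by omega]
  · simp only [h, if_neg, not_false_iff]
    rw [pvDigitsB_eq_W]
    simp only [List.reverse_nil, String.join, List.foldl_nil, String.append_empty]
    have spec := pvLenLoopB_spec (p - 1) 1 24 (by norm_num) 0 (by omega)
      (by norm_num) (by norm_num)
    have hc1 : pvC 1 = 1 := by norm_num [pvC]
    have hp : (pvLenLoopB (p - 1) 1 24 (by norm_num : (0:Int) < 24)).1
        + pvC (pvLenLoopB (p - 1) 1 24 (by norm_num : (0:Int) < 24)).2.toNat = p := by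
      rw [spec.2.2.2, hc1]; ring
    exact ((pvW_eq_rec _ _ spec.1 spec.2.2.1).trans (by rw [hp])).symm
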